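-- pv_equiv track=rewrite | github.com/SSPAWAR1/PDE-Security | pdesecurity/Exp4.py | infer_grid_shape
-- ===== SOURCE A (Python) =====
-- import math
-- from typing import Dict, List, Tuple, Optional
--
-- def infer_grid_shape(num_qubits: int) -> Tuple[int, int]:
--     """Choose a factorisation as close to square as possible."""
--     best_rows, best_cols = 1, num_qubits
--     best_gap = num_qubits - 1
--     for rows in range(1, int(math.sqrt(num_qubits)) + 1):
--         if num_qubits % rows == 0:
--             cols = num_qubits // rows
--             gap = abs(cols - rows)
--             if gap < best_gap:
--                 best_rows, best_cols = rows, cols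
--                 best_gap = gap
--     return best_rows, best_cols
-- ===== SOURCE B (Python) =====
-- import math
--
-- def infer_grid_shape(num_qubits):
--     """Choose a factorisation as close to square as possible."""
--     for rows in range(math.isqrt(num_qubits), 0, -1):
--         if num_qubits % rows == 0:
--             return rows, num_qubits // rows
--     return 1, num_qubits
-- ===== Notes on version B (the rewrite author's own statement) =====
-- stated objective: simpler
-- what changed: Replaces the full upward scan with running best-gap bookkeeping by a downward search from isqrt(n) that returns the first divisor found (the largest divisor <= sqrt(n)), which is exactly the closest-to-square factorisation; no accumulator at all.
import Mathlib
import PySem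

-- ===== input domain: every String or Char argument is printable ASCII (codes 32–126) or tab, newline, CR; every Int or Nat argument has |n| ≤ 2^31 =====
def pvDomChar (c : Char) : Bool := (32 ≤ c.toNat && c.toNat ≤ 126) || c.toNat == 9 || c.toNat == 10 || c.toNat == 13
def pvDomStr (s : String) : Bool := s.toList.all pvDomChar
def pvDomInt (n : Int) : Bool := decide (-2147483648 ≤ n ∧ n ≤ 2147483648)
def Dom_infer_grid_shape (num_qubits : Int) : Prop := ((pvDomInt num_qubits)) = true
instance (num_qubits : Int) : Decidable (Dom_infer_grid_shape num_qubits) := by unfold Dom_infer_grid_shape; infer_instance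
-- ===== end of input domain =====

-- B replaces A's upward scan with best-gap bookkeeping by a downward early-exit search
-- from isqrt(n) for the largest divisor ≤ √n (objective: simpler).

-- ===== PORT A =====
-- loop body of A's for-loop (same state (best_rows, best_cols, best_gap))
def igsStepA (num_qubits : Int) (st : Int × Int × Int) (rows : Int) : Int × Int × Int :=
  if PySem.Int.mod num_qubits rows = 0 then
    let cols := PySem.Int.floordiv num_qubits rows
    let gap := |cols - rows|
    if gap < st.2.2 then (rows, cols, gap) else st
  else st

-- int(math.sqrt(num_qubits)) ported as Int.sqrt: exact on Pre_ (0 ≤ n ≤ 2^31, below float precision loss)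
def infer_grid_shape (num_qubits : Int) : Int × Int :=
  let init : Int × Int × Int := (1, num_qubits, num_qubits - 1)
  let fin := (PySem.List.pyRange 1 (Int.sqrt num_qubits + 1) 1).foldl (igsStepA num_qubits) init
  (fin.1, fin.2.1)

-- ===== PORT B =====
-- B's 'for rows in range(isqrt(n), 0, -1)' with early return: structural countdown on rows
def igsFind (n : Int) : Nat → Int × Int
  | 0 => (1, n)
  | r + 1 =>
      if PySem.Int.mod n ((r : Int) + 1) = 0 then
        (((r : Int) + 1), PySem.Int.floordiv n ((r : Int) + 1))
      else igsFind n r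

-- math.isqrt(num_qubits) ported as Int.sqrt (exact for 0 ≤ n)
def infer_grid_shape_alt (num_qubits : Int) : Int × Int :=
  igsFind num_qubits (Int.sqrt num_qubits).toNat

-- ===== PRECONDITION & SPEC =====
-- Python A raises ValueError (math domain error) on negative num_qubits.
def Pre_infer_grid_shape (num_qubits : Int) : Prop := 0 ≤ num_qubits
instance (num_qubits : Int) : Decidable (Pre_infer_grid_shape num_qubits) := by
  unfold Pre_infer_grid_shape; infer_instance
def pvWitness_infer_grid_shape : Int := 12

def Spec_infer_grid_shape (num_qubits : Int) (out : Int × Int) : Prop := out = infer_grid_shape_alt num_qubits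
instance (num_qubits : Int) (out : Int × Int) : Decidable (Spec_infer_grid_shape num_qubits out) := by unfold Spec_infer_grid_shape; infer_instance

-- ===== CLAIM (what is proved, stated in full; the proofs are below) =====
def Claim_equal_infer_grid_shape : Prop := ∀ (num_qubits : Int), Dom_infer_grid_shape num_qubits → Pre_infer_grid_shape num_qubits → Spec_infer_grid_shape num_qubits (infer_grid_shape num_qubits)

-- ===== LEMMAS AND PROOFS =====

-- the fold state A maintains when the best divisor so far is (r, c) = igsFind n k
def igsPack (n : Int) (p : Int × Int) : Int × Int × Int :=
  (p.1, p.2, if p.1 = 1 then n - 1 else p.2 - p.1)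

-- basic facts about igsFind: its result is a divisor pair within the scanned range
lemma igsFind_props (n : Int) (k : Nat) :
    1 ≤ (igsFind n k).1 ∧ (igsFind n k).1 ≤ max (k : Int) 1 ∧
      (igsFind n k).2 * (igsFind n k).1 = n := by
  induction k with
  | zero => simp [igsFind]
  | succ r ih =>
    simp only [igsFind]
    split
    · rename_i h
      have hd : ((r : Int) + 1) ∣ n := (PySem.Int.mod_eq_zero_iff_dvd n ((r : Int) + 1)).mp h
      have hpos : (0 : Int) < (r : Int) + 1 := by omega
      refine ⟨by omega, by omega, ?_⟩
      rw [PySem.Int.floordiv_eq_ediv_of_pos hpos]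
      exact Int.ediv_mul_cancel hd
    · obtain ⟨h1, h2, h3⟩ := ih
      refine ⟨h1, by omega, h3⟩

lemma igsFind_succ_not_one (n : Int) (k : Nat)
    (h2 : 2 ≤ (igsFind n k).1) : 1 ≤ k := by
  cases k with
  | zero => simp [igsFind] at h2
  | succ r => omega

lemma int_sqrt_mul_self_le (n : Int) (hn : 0 ≤ n) : Int.sqrt n * Int.sqrt n ≤ n := by
  have h := Nat.sqrt_le n.toNat
  have h2 : ((Nat.sqrt n.toNat : Int)) * (Nat.sqrt n.toNat : Int) ≤ (n.toNat : Int) := by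
    exact_mod_cast h
  rw [Int.toNat_of_nonneg hn] at h2
  simpa [Int.sqrt] using h2

-- the invariant: after scanning rows = 1,…,k upward, A's state is igsPack of B's downward search result
lemma igs_inv (n : Int) (hn : 1 ≤ n) (k : Nat) (hk : (k : Int) ≤ Int.sqrt n) :
    (PySem.List.pyRange 1 ((k : Int) + 1) 1).foldl (igsStepA n) (1, n, n - 1)
      = igsPack n (igsFind n k) := by
  induction k with
  | zero =>
    rw [PySem.List.pyRange_one_eq_nil (by norm_num)]
    simp [igsFind, igsPack]
  | succ r ih =>
    have hr : (r : Int) ≤ Int.sqrt n := by push_cast at hk ⊢; omega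
    have hcast : ((r + 1 : Nat) : Int) = (r : Int) + 1 := by push_cast; ring
    have hrange : PySem.List.pyRange 1 ((r : Int) + 1 + 1) 1
        = PySem.List.pyRange 1 ((r : Int) + 1) 1 ++ [(r : Int) + 1] := by
      have := PySem.List.pyRange_one_succ_right (a := 1) (b := (r : Int) + 1) (by omega)
      simpa using this
    rw [hcast, hrange, List.foldl_append, ih hr]
    set d : Int := (r : Int) + 1 with hd
    have hdpos : (0 : Int) < d := by omega
    have hdle : d ≤ Int.sqrt n := by push_cast at hk; omega
    have hdd : d * d ≤ n := by
      have h1 := int_sqrt_mul_self_le n (by omega)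
      nlinarith [Int.sqrt_nonneg n]
    by_cases hmod : PySem.Int.mod n d = 0
    · -- d divides n: A's step strictly improves the gap (or rows = 1 keeps the same pair)
      have hdvd : d ∣ n := (PySem.Int.mod_eq_zero_iff_dvd n d).mp hmod
      have hq : PySem.Int.floordiv n d = n / d := PySem.Int.floordiv_eq_ediv_of_pos hdpos
      have hqd : n / d * d = n := Int.ediv_mul_cancel hdvd
      have hqge : d ≤ n / d := by nlinarith
      have habs : |n / d - d| = n / d - d := abs_of_nonneg (by omega)
      obtain ⟨hb1, hb2, hb3⟩ := igsFind_props n r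
      have hfind : igsFind n (r + 1) = (d, n / d) := by
        simp only [igsFind, ← hd, hmod, if_pos, hq]
      rw [hfind]
      simp only [List.foldl_cons, List.foldl_nil, igsStepA, hmod, if_pos, hq, habs]
      by_cases hone : (igsFind n r).1 = 1
      · have hc0 : (igsFind n r).2 = n := by rw [hone] at hb3; simpa using hb3
        have hpair : igsFind n r = (1, n) := by
          cases h' : igsFind n r with
          | mk a b => rw [h'] at hone hc0; simp_all
        by_cases hd1 : d = 1
        · have hnd : n / d = n := by rw [hd1]; simp
          simp [hpair, igsPack, hd1]
        · have hd2 : 2 ≤ d := by omega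
          have hq2 : n / d ≤ n - n / d := by nlinarith
          have hlt : n / d - d < n - 1 := by omega
          simp [hpair, igsPack, hlt, hd1]
      · -- previous best is a proper divisor r0 with 2 ≤ r0 ≤ r < d
        have hr0 : 2 ≤ (igsFind n r).1 := by omega
        have hrge1 : 1 ≤ r := igsFind_succ_not_one n r hr0
        have hr0le : (igsFind n r).1 ≤ (r : Int) := by
          have h1 : (1 : Int) ≤ (r : Int) := by exact_mod_cast hrge1
          omega
        have hr0d : (igsFind n r).1 < d := by omega
        have hc0pos : 0 < (igsFind n r).2 := by nlinarith
        have hqlt : n / d < (igsFind n r).2 := by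
          by_contra hcon
          rw [not_lt] at hcon
          have h1 : (igsFind n r).2 * (igsFind n r).1 ≤ n / d * (igsFind n r).1 :=
            mul_le_mul_of_nonneg_right hcon (by omega)
          have h2 : n / d * (igsFind n r).1 < n / d * d :=
            mul_lt_mul_of_pos_left hr0d (by omega)
          omega
        have hgap : n / d - d < (igsFind n r).2 - (igsFind n r).1 := by omega
        have hdne1 : d ≠ 1 := by omega
        simp [igsPack, hone, hgap, hdne1]
    · -- d does not divide: both programs keep the previous value
      have hfind : igsFind n (r + 1) = igsFind n r := by
        simp only [igsFind, ← hd]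
        simp [hmod]
      rw [hfind]
      simp [igsStepA, hmod]

-- ===== VERDICT (by name: the statement is the Claim_ definition above) =====
theorem infer_grid_shape_spec : Claim_equal_infer_grid_shape := by
  intro n _ hpre
  unfold Spec_infer_grid_shape infer_grid_shape infer_grid_shape_alt
  by_cases h0 : n = 0
  · subst h0; decide
  · have hn : 1 ≤ n := by unfold Pre_infer_grid_shape at hpre; omega
    have hs : ((Int.sqrt n).toNat : Int) = Int.sqrt n := Int.toNat_of_nonneg (Int.sqrt_nonneg n)
    have hinv := igs_inv n hn (Int.sqrt n).toNat (by omega)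
    rw [hs] at hinv
    simp only [hinv, igsPack]
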